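-- pv_equiv track=rewrite | github.com/lingduoduo/Leetcode | AI-Enable/Nonogram/src/nonogram.py | extract_runs
-- ===== SOURCE A (Python) =====
-- from enum import Enum
-- from typing import List, Optional, Tuple
--
-- class CellState(str, Enum):
--     UNKNOWN = "?"
--     FILLED = "#"
--     EMPTY = "."
--
-- def extract_runs(line: List[CellState]) -> List[int]:
--     runs: List[int] = []
--     length: int = 0
--     for cell in line:
--         if cell == CellState.FILLED:
--             length += 1
--         elif length > 0:
--             runs.append(length)
--             length = 0
--
--     # Handle case where line ends with filled cells
--     if length > 0:
--         runs.append(length)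
--
--     return runs if runs else [0]
-- ===== SOURCE B (Python) =====
-- def extract_runs(line):
--     n = len(line)
--     starts = [i for i in range(n) if line[i] == "#" and (i == 0 or line[i - 1] != "#")]
--     ends = [i for i in range(n) if line[i] == "#" and (i == n - 1 or line[i + 1] != "#")]
--     runs = [e - s + 1 for s, e in zip(starts, ends)]
--     return runs if runs else [0]
-- ===== Notes on version B (the rewrite author's own statement) =====
-- stated objective: alternative
-- what changed: Replaces A's single-pass mutable run-length counter with boundary detection: two index scans locate the start positions and end positions of maximal '#' runs by comparing each cell with its neighbour, and run lengths are obtained as end-start+1 from zipping the two position lists.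
import Mathlib
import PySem

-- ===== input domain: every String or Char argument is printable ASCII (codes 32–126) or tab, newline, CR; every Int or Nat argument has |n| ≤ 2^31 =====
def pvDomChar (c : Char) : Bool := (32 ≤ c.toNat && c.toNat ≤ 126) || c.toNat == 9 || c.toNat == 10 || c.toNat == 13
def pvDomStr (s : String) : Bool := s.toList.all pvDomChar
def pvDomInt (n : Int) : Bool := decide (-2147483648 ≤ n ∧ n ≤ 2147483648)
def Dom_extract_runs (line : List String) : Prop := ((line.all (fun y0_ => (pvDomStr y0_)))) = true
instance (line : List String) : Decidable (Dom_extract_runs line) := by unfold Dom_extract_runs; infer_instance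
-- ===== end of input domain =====

-- ===== PORT A =====
-- B replaces A's mutable run-length counter with neighbour-comparison boundary detection (alternative; same cost).
-- A's for-loop over (runs, length), as structural recursion on the line:
def extractRunsLoop : List String → List Int → Int → List Int
  | [], runs, length => if length > 0 then runs ++ [length] else runs
  | cell :: rest, runs, length =>
    if cell == "#" then extractRunsLoop rest runs (length + 1)
    else if length > 0 then extractRunsLoop rest (runs ++ [length]) 0
    else extractRunsLoop rest runs length

def extract_runs (line : List String) : List Int :=
  let runs := extractRunsLoop line [] 0
  if runs = [] then [0] else runs

-- ===== PORT B =====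
-- the two index comprehensions of Source B; every index drawn from range(n) is in range, and the
-- neighbour accesses line[i-1] / line[i+1] are only reached when the left disjunct already
-- failed (i ≠ 0 resp. i ≠ n-1), so List.getD with default "" is exact here
def startsOf (line : List String) : List Nat :=
  (List.range line.length).filter
    (fun i => line.getD i "" == "#" && (i == 0 || line.getD (i - 1) "" != "#"))

def endsOf (line : List String) : List Nat :=
  (List.range line.length).filter
    (fun i => line.getD i "" == "#" && (i == line.length - 1 || line.getD (i + 1) "" != "#"))

def extract_runs_alt (line : List String) : List Int :=
  let runs := List.zipWith (fun (s e : Nat) => (e : Int) - (s : Int) + 1) (startsOf line) (endsOf line)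
  if runs = [] then [0] else runs

-- ===== PRECONDITION & SPEC =====
def Spec_extract_runs (line : List String) (out : List Int) : Prop := out = extract_runs_alt line
instance (line : List String) (out : List Int) : Decidable (Spec_extract_runs line out) := by unfold Spec_extract_runs; infer_instance

-- ===== CLAIM (what is proved, stated in full; the proofs are below) =====
def Claim_equal_extract_runs : Prop := ∀ (line : List String), Dom_extract_runs line → Spec_extract_runs line (extract_runs line)

-- ===== LEMMAS AND PROOFS =====

-- run-length spec both sides are reduced to: lengths of the maximal "#"-runs of the line
def runsOf : List String → List Int
  | [] => []
  | x :: xs =>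
    (if x == "#" then [((x :: xs.takeWhile (· == x)).length : Int)] else []) ++
      runsOf (xs.dropWhile (· == x))
termination_by line => line.length
decreasing_by
  simp only [List.length_cons]
  exact Nat.lt_succ_of_le (xs.length_dropWhile_le _)

-- ---------- A-side: the loop computes runsOf ----------

theorem extractRunsLoop_append (cs : List String) (runs : List Int) (length : Int) :
    extractRunsLoop cs runs length = runs ++ extractRunsLoop cs [] length := by
  induction cs generalizing runs length with
  | nil => simp [extractRunsLoop]; split <;> simp
  | cons c rest ih =>
    simp only [extractRunsLoop]
    split
    · rw [ih runs, ih []]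
    · split
      · rw [ih, ih ([] ++ [length])]; simp
      · exact ih runs length

theorem extractRunsLoop_skip (t rest : List String) (h : ∀ x ∈ t, ¬ x = "#") :
    extractRunsLoop (t ++ rest) [] 0 = extractRunsLoop rest [] 0 := by
  induction t with
  | nil => rfl
  | cons c t ih =>
    have hc : ¬ c = "#" := h c (by simp)
    simp only [List.cons_append, extractRunsLoop, beq_iff_eq, hc, if_false]
    simp only [show ¬ (0 : Int) > 0 by omega, if_false]
    exact ih (fun x hx => h x (by simp [hx]))

theorem extractRunsLoop_run (t : List String) (n : Int) (hn : 0 < n)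
    (h : ∀ x ∈ t, x = "#") (rest : List String) :
    extractRunsLoop (t ++ rest) [] n =
      match rest with
      | [] => [n + t.length]
      | d :: r => if d = "#" then extractRunsLoop (t ++ rest) [] n
                  else (n + t.length) :: extractRunsLoop r [] 0 := by
  induction t generalizing n with
  | nil =>
    cases rest with
    | nil => simp [extractRunsLoop, hn]
    | cons d r =>
      by_cases hd : d = "#"
      · simp [hd]
      · simp only [List.nil_append, extractRunsLoop, beq_iff_eq, hd, if_false, hn, if_pos,
          List.length_nil]
        rw [extractRunsLoop_append]
        simp
  | cons c t ih =>
    have hc : c = "#" := h c (by simp)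
    have h' : ∀ x ∈ t, x = "#" := fun x hx => h x (by simp [hx])
    have step : extractRunsLoop ((c :: t) ++ rest) [] n = extractRunsLoop (t ++ rest) [] (n + 1) := by
      simp [extractRunsLoop, hc]
    rw [step, ih (n + 1) (by omega) h']
    cases rest with
    | nil => simp only [List.length_cons]; congr 1; push_cast; ring
    | cons d r =>
      by_cases hd : d = "#"
      · simp only [hd, if_true]
      · simp only [hd, if_false, List.length_cons]
        congr 1
        push_cast; ring

theorem core_eq : ∀ line : List String, extractRunsLoop line [] 0 = runsOf line := by
  intro line
  induction hl : line.length using Nat.strong_induction_on generalizing line with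
  | _ n ih =>
  cases line with
  | nil => simp [extractRunsLoop, runsOf]
  | cons c cs =>
    subst hl
    by_cases hc : c = "#"
    · have hstep : extractRunsLoop (c :: cs) [] 0 = extractRunsLoop cs [] 1 := by
        simp [extractRunsLoop, hc]
      have hsplit : cs = cs.takeWhile (· == "#") ++ cs.dropWhile (· == "#") :=
        (List.takeWhile_append_dropWhile).symm
      have htk : ∀ x ∈ cs.takeWhile (· == "#"), x = "#" := by
        intro x hx
        have := List.mem_takeWhile_imp hx
        simpa using this
      have hGB : runsOf (c :: cs) =
          ((cs.takeWhile (· == "#")).length + 1 : Int) ::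
            runsOf (cs.dropWhile (· == "#")) := by
      -- unfold one step of runsOf at head "#"
        rw [runsOf]
        simp [hc]
      rw [hstep, hGB]
      conv_lhs => rw [hsplit]
      rw [extractRunsLoop_run _ 1 (by omega) htk]
      cases hdw : cs.dropWhile (· == "#") with
      | nil => rw [runsOf]; simp; ring
      | cons d r =>
        have hd : ¬ d = "#" := by
          have := List.head_dropWhile_not (· == "#") (l := cs) (by simp [hdw])
          simp [hdw] at this
          simpa using this
        simp only [hd, if_false]
        congr 1
        · ring
        · have h1 : extractRunsLoop r [] 0 = runsOf r :=
            ih r.length (by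
              have : (cs.dropWhile (· == "#")).length ≤ cs.length := cs.length_dropWhile_le _
              rw [hdw] at this; simp at this ⊢; omega) r rfl
          have h3 : extractRunsLoop (d :: r) [] 0 = extractRunsLoop r [] 0 := by
            simp [extractRunsLoop, hd]
          have h2 : extractRunsLoop (d :: r) [] 0 = runsOf (d :: r) :=
            ih (d :: r).length (by
              have : (cs.dropWhile (· == "#")).length ≤ cs.length := cs.length_dropWhile_le _
              rw [hdw] at this; simp at this ⊢; omega) (d :: r) rfl
          rw [← h3, h2]
    · have hstep : extractRunsLoop (c :: cs) [] 0 = extractRunsLoop cs [] 0 := by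
        simp [extractRunsLoop, hc]
      have hsplit : cs = cs.takeWhile (· == c) ++ cs.dropWhile (· == c) :=
        (List.takeWhile_append_dropWhile).symm
      have htk : ∀ x ∈ cs.takeWhile (· == c), ¬ x = "#" := by
        intro x hx
        have := List.mem_takeWhile_imp hx
        simp at this
        simpa [this] using hc
      have hGB : runsOf (c :: cs) = runsOf (cs.dropWhile (· == c)) := by
        rw [runsOf]; simp [hc]
      rw [hstep, hGB]
      conv_lhs => rw [hsplit]
      rw [extractRunsLoop_skip _ _ htk]
      exact ih (cs.dropWhile (· == c)).length (by
        have : (cs.dropWhile (· == c)).length ≤ cs.length := cs.length_dropWhile_le _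
        simp; omega) _ rfl

-- ---------- B-side: the boundary scans compute runsOf ----------

-- generalisation of startsOf with an explicit "previous cell" p (the port has p = "", i.e. not "#")
def sFil (p : String) (line : List String) : List Nat :=
  (List.range line.length).filter
    (fun i => line.getD i "" == "#" &&
      (if i == 0 then p != "#" else line.getD (i - 1) "" != "#"))

-- recursive restatements of the two filters, on which the run induction is done
def sRec (p : String) : List String → List Nat
  | [] => []
  | c :: cs => (if c == "#" && p != "#" then [0] else []) ++ (sRec c cs).map (· + 1)

def eRec : List String → List Nat
  | [] => []
  | c :: cs =>
    (if c == "#" && (decide (cs = []) || cs.getD 0 "" != "#") then [0] else []) ++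
      (eRec cs).map (· + 1)

theorem startsOf_eq_sFil (line : List String) : startsOf line = sFil "" line := by
  unfold startsOf sFil
  apply List.filter_congr
  intro i _
  cases i with
  | zero => simp
  | succ j => simp

theorem map_succ_eq (F : List Nat) : List.map Nat.succ F = List.map (· + 1) F :=
  List.map_congr_left (fun _ _ => rfl)

theorem sFil_cons (p c : String) (cs : List String) :
    sFil p (c :: cs) = (if c == "#" && p != "#" then [0] else []) ++ (sFil c cs).map (· + 1) := by
  unfold sFil
  rw [List.length_cons, List.range_succ_eq_map, List.filter_cons, List.filter_map]
  have h0 : ((c :: cs).getD 0 "" == "#" &&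
      if (0 == 0) = true then p != "#" else (c :: cs).getD (0 - 1) "" != "#") =
      (c == "#" && p != "#") := by simp
  have hrest : List.filter ((fun i => (c :: cs).getD i "" == "#" &&
        if (i == 0) = true then p != "#" else (c :: cs).getD (i - 1) "" != "#") ∘ Nat.succ)
        (List.range cs.length) =
      List.filter (fun i => cs.getD i "" == "#" &&
        if (i == 0) = true then c != "#" else cs.getD (i - 1) "" != "#")
        (List.range cs.length) := by
    apply List.filter_congr
    intro i _
    cases i <;> simp
  rw [hrest, h0, map_succ_eq]
  split <;> simp

theorem sFil_eq_sRec (p : String) (line : List String) : sFil p line = sRec p line := by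
  induction line generalizing p with
  | nil => rfl
  | cons c cs ih => rw [sFil_cons, sRec, ih]

theorem endsOf_cons (c : String) (cs : List String) :
    endsOf (c :: cs) =
      (if c == "#" && (decide (cs = []) || cs.getD 0 "" != "#") then [0] else []) ++
        (endsOf cs).map (· + 1) := by
  unfold endsOf
  rw [List.length_cons, List.range_succ_eq_map, List.filter_cons, List.filter_map]
  have hrest : List.filter ((fun i => (c :: cs).getD i "" == "#" &&
        (i == cs.length + 1 - 1 || (c :: cs).getD (i + 1) "" != "#")) ∘ Nat.succ)
        (List.range cs.length) =
      List.filter (fun i => cs.getD i "" == "#" &&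
        (i == cs.length - 1 || cs.getD (i + 1) "" != "#"))
        (List.range cs.length) := by
    apply List.filter_congr
    intro i hi
    have hlt : i < cs.length := List.mem_range.mp hi
    have h1 : (i + 1 == cs.length + 1 - 1) = (i == cs.length - 1) := by
      simp only [Nat.add_sub_cancel]
      rw [Bool.eq_iff_iff]
      simp only [beq_iff_eq]
      omega
    simp only [Function.comp_apply, Nat.succ_eq_add_one, List.getD_cons_succ, h1]
  have hgoal0 : ((c :: cs).getD 0 "" == "#" &&
      (0 == cs.length + 1 - 1 || (c :: cs).getD (0 + 1) "" != "#")) =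
      (c == "#" && (decide (cs = []) || cs.getD 0 "" != "#")) := by
    rcases cs with _ | ⟨d, ds⟩ <;> simp
  rw [hrest, map_succ_eq, hgoal0]
  split <;> simp

theorem endsOf_eq_eRec (line : List String) : endsOf line = eRec line := by
  induction line with
  | nil => rfl
  | cons c cs ih => rw [endsOf_cons, eRec, ih]

-- when the head is not "#", the previous cell is irrelevant to sRec
theorem sRec_head_irrel (p q : String) : ∀ cs : List String,
    (cs = [] ∨ cs.getD 0 "" ≠ "#") → sRec p cs = sRec q cs := by
  intro cs h
  cases cs with
  | nil => rfl
  | cons d ds =>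
    have hd : ¬ d = "#" := by
      rcases h with h | h
      · exact absurd h (by simp)
      · simpa using h
    simp [sRec, hd]

-- starts inside a maximal "#"-run: only shifted by the run's length
theorem sRec_run (t : List String) (ht : ∀ x ∈ t, x = "#") (r : List String) :
    sRec "#" (t ++ r) = (sRec "#" r).map (· + t.length) := by
  induction t with
  | nil => simp
  | cons c t ih =>
    have hc : c = "#" := ht c (by simp)
    have ht' : ∀ x ∈ t, x = "#" := fun x hx => ht x (by simp [hx])
    subst hc
    rw [List.cons_append, sRec, ih ht']
    rw [if_neg (by simp)]
    simp only [List.nil_append, List.map_map, List.length_cons]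
    apply List.map_congr_left
    intro a _
    simp only [Function.comp_apply]
    omega

theorem map_add_one_add (L : List Nat) (k : Nat) :
    (L.map (· + k)).map (· + 1) = L.map (· + (k + 1)) := by
  rw [List.map_map]
  apply List.map_congr_left
  intro a _
  simp only [Function.comp_apply]
  omega

-- ends inside a maximal "#"-run followed by a non-"#" (or empty) remainder
theorem eRec_run (t : List String) (ht : ∀ x ∈ t, x = "#")
    (r : List String) (hr : r = [] ∨ r.getD 0 "" ≠ "#") :
    eRec (t ++ r) =
      (if t = [] then [] else [t.length - 1]) ++ (eRec r).map (· + t.length) := by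
  induction t with
  | nil => simp
  | cons c t ih =>
    have hc : c = "#" := ht c (by simp)
    have ht' : ∀ x ∈ t, x = "#" := fun x hx => ht x (by simp [hx])
    subst hc
    rw [List.cons_append, eRec, ih ht']
    cases t with
    | nil =>
      have hcond : ((("#" : String) == "#") &&
          (decide (([] : List String) ++ r = []) || ([] ++ r).getD 0 "" != "#")) = true := by
        cases r with
        | nil => simp
        | cons a as =>
          have ha : ¬ a = "#" := by
            rcases hr with h | h
            · exact absurd h (by simp)
            · simpa using h
          simp [ha]
      rw [if_pos hcond]
      simp
    | cons d ds =>
      have hd : d = "#" := ht' d (by simp)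
      rw [if_neg (by simp [hd]),
        if_neg (show ¬ (d :: ds) = ([] : List String) by simp),
        if_neg (show ¬ ("#" :: d :: ds) = ([] : List String) by simp)]
      simp only [List.nil_append]
      rw [List.map_append, map_add_one_add]
      simp only [List.map_cons, List.map_nil, List.length_cons, List.singleton_append]
      refine List.cons_eq_cons.mpr ⟨by omega, rfl⟩

-- shifting both position lists by the same amount leaves the lengths unchanged
theorem zip_shift (k : Nat) (S E : List Nat) :
    List.zipWith (fun (s e : Nat) => (e : Int) - (s : Int) + 1) (S.map (· + k)) (E.map (· + k)) =
      List.zipWith (fun (s e : Nat) => (e : Int) - (s : Int) + 1) S E := by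
  induction S generalizing E with
  | nil => simp
  | cons s S ih =>
    cases E with
    | nil => simp
    | cons e E =>
      simp only [List.map_cons, List.zipWith_cons_cons, ih]
      congr 1
      push_cast
      ring

-- skipping a non-"#" head leaves runsOf unchanged
theorem runsOf_cons_ne (c : String) (hc : ¬ c = "#") (cs : List String) :
    runsOf (c :: cs) = runsOf cs := by
  cases cs with
  | nil =>
    conv_lhs => rw [runsOf]
    simp [hc]
  | cons x xs =>
    by_cases hx : x = c
    · subst hx
      rw [runsOf]
      conv_rhs => rw [runsOf]
      simp [hc]
    · rw [runsOf]
      simp [hc, show (x == c) = false by simpa using hx]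

-- main B-side lemma: the zipped boundary lists compute runsOf
theorem zip_eq_runsOf : ∀ line : List String, ∀ p : String, ¬ p = "#" →
    List.zipWith (fun (s e : Nat) => (e : Int) - (s : Int) + 1) (sRec p line) (eRec line) =
      runsOf line := by
  intro line
  induction hl : line.length using Nat.strong_induction_on generalizing line with
  | _ n ih =>
  intro p hp
  cases line with
  | nil => rw [runsOf]; rfl
  | cons c cs =>
    subst hl
    by_cases hc : c = "#"
    · subst hc
      have hsplit : cs = cs.takeWhile (· == "#") ++ cs.dropWhile (· == "#") :=
        (List.takeWhile_append_dropWhile).symm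
      set t := cs.takeWhile (· == "#") with htdef
      set r := cs.dropWhile (· == "#") with hrdef
      have htk : ∀ x ∈ t, x = "#" := by
        intro x hx
        have := List.mem_takeWhile_imp hx
        simpa using this
      have hr : r = [] ∨ r.getD 0 "" ≠ "#" := by
        cases hdw : cs.dropWhile (· == "#") with
        | nil => exact Or.inl (by rw [hrdef, hdw])
        | cons d ds =>
          right
          have hd : ¬ d = "#" := by
            have := List.head_dropWhile_not (· == "#") (l := cs) (by simp [hdw])
            simp [hdw] at this
            simpa using this
          rw [hrdef, hdw]
          simpa using hd
      -- starts
      have hS : sRec p ("#" :: cs) = 0 :: ((sRec "#" r).map (· + (t.length + 1))) := by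
        rw [sRec]
        simp only [beq_self_eq_true, Bool.true_and]
        rw [if_pos (show (p != "#") = true by simpa using hp), List.singleton_append]
        refine List.cons_eq_cons.mpr ⟨rfl, ?_⟩
        conv_lhs => rw [hsplit]
        rw [sRec_run t htk r, List.map_map]
        apply List.map_congr_left
        intro a _
        simp only [Function.comp_apply]
        omega
      -- ends
      have hE : eRec ("#" :: cs) = t.length :: ((eRec r).map (· + (t.length + 1))) := by
        rw [eRec]
        conv_lhs => rw [hsplit]
        rw [eRec_run t htk r hr]
        cases htc : t with
        | nil =>
          rcases hr with h | h
          · rw [h]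
            simp
          · have h' : ¬ r[0]?.getD "" = "#" := by simpa [List.getD] using h
            simp [h']
        | cons u us =>
          have hu : u = "#" := htk u (by rw [htc]; simp)
          rw [if_neg (by simp [hu]),
            if_neg (show ¬ (u :: us) = ([] : List String) by simp)]
          simp only [List.nil_append]
          rw [List.map_append, map_add_one_add]
          simp only [List.map_cons, List.map_nil, List.length_cons, List.singleton_append]
          refine List.cons_eq_cons.mpr ⟨by omega, rfl⟩
      rw [hS, hE]
      simp only [List.zipWith_cons_cons, zip_shift]
      have hrlen : r.length < cs.length + 1 := by
        have : r.length ≤ cs.length := by rw [hrdef]; exact cs.length_dropWhile_le _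
        omega
      have hrec : List.zipWith (fun (s e : Nat) => (e : Int) - (s : Int) + 1) (sRec "#" r) (eRec r) =
          runsOf r := by
        rw [sRec_head_irrel "#" "?" r hr]
        exact ih r.length (by simpa using hrlen) r rfl "?" (by decide)
      rw [hrec]
      rw [runsOf]
      simp only [beq_self_eq_true, ← htdef, ← hrdef]
      rw [if_pos trivial, List.singleton_append]
      refine List.cons_eq_cons.mpr ⟨?_, rfl⟩
      simp only [List.length_cons]
      push_cast
      ring
    · rw [sRec, eRec]
      rw [if_neg (by simp [hc]), if_neg (by simp [hc])]
      simp only [List.nil_append, zip_shift]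
      rw [runsOf_cons_ne c hc cs]
      cases cs with
      | nil => rw [runsOf]; rfl
      | cons d ds =>
        by_cases hd : d = "#"
        · exact ih (d :: ds).length (by simp) (d :: ds) rfl c hc
        · rw [sRec_head_irrel c "?" (d :: ds) (Or.inr (by simpa using hd))]
          exact ih (d :: ds).length (by simp) (d :: ds) rfl "?" (by decide)

-- ===== VERDICT (by name: the statement is the Claim_ definition above) =====
theorem extract_runs_spec : Claim_equal_extract_runs := by
  intro line _
  unfold Spec_extract_runs extract_runs extract_runs_alt
  rw [core_eq, startsOf_eq_sFil, sFil_eq_sRec, endsOf_eq_eRec,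
    zip_eq_runsOf line "" (by decide)]
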